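-- pv_equiv track=rewrite | github.com/utahnlp/marginal_srl_with_semlink | preprocess/extract.py | cut_leaves
-- ===== SOURCE A (Python) =====
-- def cut_leaves(leaves, label, sym):
-- 	rs = []
-- 	for l, t in leaves:
-- 		if l != '-NONE-' and sym in t:
-- 			sub_toks = t.split(sym)
-- 			sub_toks = [p for pair in zip(sub_toks, [sym]*len(sub_toks)) for p in pair][:-1]
-- 			sub_labels = [p for pair in zip([l]*len(sub_toks), [label]*len(sub_toks)) for p in pair][:-1]
-- 			for sub_l, sub_t in zip(sub_labels, sub_toks):
-- 				rs.append((sub_l, sub_t))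
-- 		else:
-- 			rs.append((l, t))
-- 	return rs
-- ===== SOURCE B (Python) =====
-- def cut_leaves(leaves, label, sym):
-- 	rs = []
-- 	for l, t in leaves:
-- 		if l != '-NONE-' and sym in t:
-- 			for i, piece in enumerate(t.split(sym)):
-- 				if i > 0:
-- 					rs.append((label, sym))
-- 				rs.append((l, piece))
-- 		else:
-- 			rs.append((l, t))
-- 	return rs
-- ===== Notes on version B (the rewrite author's own statement) =====
-- stated objective: simpler
-- what changed: B makes one direct pass over the split pieces, inserting the (label, sym) separator pair before each non-first piece, instead of A's building of two interleaved token/label lists via zip-flatten-[:-1] and zipping them together.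
import Mathlib
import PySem

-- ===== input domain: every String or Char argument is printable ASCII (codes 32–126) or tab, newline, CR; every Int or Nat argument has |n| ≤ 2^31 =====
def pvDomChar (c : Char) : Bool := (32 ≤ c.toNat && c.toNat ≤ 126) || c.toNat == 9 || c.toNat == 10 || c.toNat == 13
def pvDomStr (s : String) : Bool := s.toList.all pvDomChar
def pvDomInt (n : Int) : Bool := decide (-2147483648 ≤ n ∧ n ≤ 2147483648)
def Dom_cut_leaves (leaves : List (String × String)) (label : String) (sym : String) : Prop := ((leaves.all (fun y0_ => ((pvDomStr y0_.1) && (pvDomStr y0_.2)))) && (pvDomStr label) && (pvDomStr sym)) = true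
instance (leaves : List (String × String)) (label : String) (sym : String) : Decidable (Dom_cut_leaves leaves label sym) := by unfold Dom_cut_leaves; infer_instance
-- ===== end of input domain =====

-- B replaces A's zip-flatten-[:-1] interleaving of tokens and labels by one direct pass
-- over the split pieces that inserts the (label, sym) pair before each non-first piece (objective: simpler).

-- ===== PORT A =====
-- literal transliteration of A: build sub_toks and sub_labels by zip/flatten/[:-1], then zip them.
-- t.split(sym) is PySem.Str.split? (none exactly when sym = ""; that raise is excluded by Pre_, .getD [] there).
def cut_leaves (leaves : List (String × String)) (label : String) (sym : String) : List (String × String) :=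
  leaves.foldl (fun rs lt =>
    let l := lt.1
    let t := lt.2
    if l ≠ "-NONE-" ∧ PySem.Str.isIn sym t = true then
      let sub_toks0 := (PySem.Str.split? t sym).getD []
      let sub_toks := PySem.List.slice
        ((sub_toks0.zip (List.replicate sub_toks0.length sym)).flatMap (fun p => [p.1, p.2]))
        none (some (-1))
      let sub_labels := PySem.List.slice
        (((List.replicate sub_toks.length l).zip (List.replicate sub_toks.length label)).flatMap
          (fun p => [p.1, p.2]))
        none (some (-1))
      rs ++ sub_labels.zip sub_toks
    else
      rs ++ [(l, t)]) []

-- ===== PORT B =====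
-- literal transliteration of B: one pass over enumerate(t.split(sym)).
def cut_leaves_alt (leaves : List (String × String)) (label : String) (sym : String) : List (String × String) :=
  leaves.foldl (fun rs lt =>
    let l := lt.1
    let t := lt.2
    if l ≠ "-NONE-" ∧ PySem.Str.isIn sym t = true then
      (PySem.List.enumerate ((PySem.Str.split? t sym).getD []) 0).foldl
        (fun rs ip =>
          (if ip.1 > 0 then rs ++ [(label, sym)] else rs) ++ [(l, ip.2)])
        rs
    else
      rs ++ [(l, t)]) []

-- ===== PRECONDITION & SPEC =====
-- Pre_ excludes exactly the inputs where Python A raises ValueError: sym = "" while some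
-- leaf has a label other than '-NONE-' (then '' in t holds and t.split('') raises).
def Pre_cut_leaves (leaves : List (String × String)) (label : String) (sym : String) : Prop :=
  sym ≠ "" ∨ ∀ p ∈ leaves, p.1 = "-NONE-"
instance (leaves : List (String × String)) (label : String) (sym : String) : Decidable (Pre_cut_leaves leaves label sym) := by unfold Pre_cut_leaves; infer_instance

def pvWitness_cut_leaves : (List (String × String)) × String × String :=
  ([("A", "a-b"), ("-NONE-", "x")], "SEP", "-")

def Spec_cut_leaves (leaves : List (String × String)) (label : String) (sym : String) (out : List (String × String)) : Prop := out = cut_leaves_alt leaves label sym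
instance (leaves : List (String × String)) (label : String) (sym : String) (out : List (String × String)) : Decidable (Spec_cut_leaves leaves label sym out) := by unfold Spec_cut_leaves; infer_instance

-- ===== CLAIM (what is proved, stated in full; the proofs are below) =====
def Claim_equal_cut_leaves : Prop := ∀ (leaves : List (String × String)) (label : String) (sym : String), Dom_cut_leaves leaves label sym → Pre_cut_leaves leaves label sym → Spec_cut_leaves leaves label sym (cut_leaves leaves label sym)

-- ===== LEMMAS AND PROOFS =====

-- the common per-leaf value in the split branch
def pvItem (l label sym : String) (ps : List String) : List (String × String) :=
  match ps with
  | [] => []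
  | p :: rest => (l, p) :: rest.flatMap (fun q => [(label, sym), (l, q)])

-- the alternating label stream of A, 2k entries: l, label, l, label, …
def pvJ (l label : String) (k : Nat) : List String :=
  (List.replicate k (l, label)).flatMap (fun p => [p.1, p.2])

theorem pvJ_succ (l label : String) (k : Nat) :
    pvJ l label (k + 1) = l :: label :: pvJ l label k := by
  simp [pvJ, List.replicate_succ]

theorem pvJ_length (l label : String) (k : Nat) : (pvJ l label k).length = 2 * k := by
  induction k with
  | zero => simp [pvJ]
  | succ k ih => rw [pvJ_succ]; simp [ih]; omega

-- dropping the last element of the longer list does not change a zip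
theorem pv_zip_dropLast {α β : Type} (ys : List α) (xs : List β)
    (h : xs.length < ys.length) : ys.dropLast.zip xs = ys.zip xs := by
  apply List.ext_getElem
  · simp [List.length_zip, List.length_dropLast]; omega
  · intro i h1 h2
    simp only [List.getElem_zip]
    congr 1
    rw [List.getElem_dropLast]

-- A's zip of the alternating label stream against the interleaved tokens is B's direct pass
theorem pv_key (l label sym : String) :
    ∀ (ps : List String) (k : Nat), ps.length ≤ k →
      (pvJ l label k).zip ((ps.flatMap (fun p => [p, sym])).dropLast)
        = pvItem l label sym ps := by
  intro ps
  induction ps with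
  | nil => intro k _; simp [pvItem]
  | cons p rest ih =>
    intro k hk
    have hk' : rest.length + 1 ≤ k := by simpa using hk
    cases rest with
    | nil =>
      obtain ⟨k', rfl⟩ : ∃ k', k = k' + 1 := ⟨k - 1, by omega⟩
      simp [pvJ_succ, pvItem]
    | cons r rest' =>
      obtain ⟨k', rfl⟩ : ∃ k', k = k' + 1 := ⟨k - 1, by simp at hk'; omega⟩
      have hne : (r :: rest').flatMap (fun p => [p, sym]) ≠ [] := by simp
      have hstep : ((p :: r :: rest').flatMap (fun p => [p, sym])).dropLast
          = p :: sym :: ((r :: rest').flatMap (fun p => [p, sym])).dropLast := by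
        rw [List.flatMap_cons, List.dropLast_append_of_ne_nil hne]; rfl
      rw [hstep, pvJ_succ]
      simp only [List.zip_cons_cons]
      rw [ih k' (by simp at hk' ⊢; omega)]
      simp [pvItem]

-- A's per-leaf split branch equals pvItem
theorem pvA_item (l label sym : String) (ps : List String) :
    (PySem.List.slice
        (((List.replicate (PySem.List.slice
            ((ps.zip (List.replicate ps.length sym)).flatMap (fun p => [p.1, p.2]))
            none (some (-1))).length l).zip
          (List.replicate (PySem.List.slice
            ((ps.zip (List.replicate ps.length sym)).flatMap (fun p => [p.1, p.2]))
            none (some (-1))).length label)).flatMap (fun p => [p.1, p.2]))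
        none (some (-1))).zip
      (PySem.List.slice
        ((ps.zip (List.replicate ps.length sym)).flatMap (fun p => [p.1, p.2]))
        none (some (-1)))
    = pvItem l label sym ps := by
  have hz : (ps.zip (List.replicate ps.length sym)).flatMap (fun p => [p.1, p.2])
      = ps.flatMap (fun p => [p, sym]) := by
    induction ps with
    | nil => simp
    | cons p rest ih => simp [List.replicate_succ, ih]
  rw [PySem.List.slice_to_neg_one, PySem.List.slice_to_neg_one, hz]
  set xs := (ps.flatMap (fun p => [p, sym])).dropLast with hxs
  have hlab : (List.replicate xs.length l).zip (List.replicate xs.length label)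
      = List.replicate xs.length (l, label) := by
    simp
  rw [hlab]
  show (pvJ l label xs.length).dropLast.zip xs = pvItem l label sym ps
  cases ps with
  | nil => simp [pvItem, hxs]
  | cons p rest =>
    have hxl : xs.length = 2 * (rest.length + 1) - 1 := by
      simp [hxs, List.length_dropLast, List.length_flatMap]; omega
    rw [pv_zip_dropLast _ _ (by rw [pvJ_length]; omega)]
    exact pv_key l label sym (p :: rest) xs.length (by rw [hxl]; simp only [List.length_cons]; omega)

-- B's per-leaf inner loop equals rs ++ pvItem (tail part: every index ≥ 1)
theorem pvB_tail (l label sym : String) (ps : List String) :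
    ∀ (s : Int) (rs : List (String × String)), 1 ≤ s →
      (PySem.List.enumerate ps s).foldl
        (fun rs ip => (if ip.1 > 0 then rs ++ [(label, sym)] else rs) ++ [(l, ip.2)]) rs
      = rs ++ ps.flatMap (fun q => [(label, sym), (l, q)]) := by
  induction ps with
  | nil => intro s rs _; simp [PySem.List.enumerate]
  | cons p rest ih =>
    intro s rs hs
    rw [show PySem.List.enumerate (p :: rest) s = (s, p) :: PySem.List.enumerate rest (s + 1) from rfl]
    simp only [List.foldl_cons]
    rw [if_pos (by simpa using hs)]
    rw [ih (s + 1) _ (by omega)]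
    simp

theorem pvB_item (l label sym : String) (ps : List String) (rs : List (String × String)) :
    (PySem.List.enumerate ps 0).foldl
        (fun rs ip => (if ip.1 > 0 then rs ++ [(label, sym)] else rs) ++ [(l, ip.2)]) rs
      = rs ++ pvItem l label sym ps := by
  cases ps with
  | nil => simp [PySem.List.enumerate, pvItem]
  | cons p rest =>
    rw [show PySem.List.enumerate (p :: rest) 0 = (0, p) :: PySem.List.enumerate rest 1 from rfl]
    simp only [List.foldl_cons, if_neg (by norm_num : ¬ ((0:Int) > 0))]
    rw [pvB_tail l label sym rest 1 _ (by norm_num)]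
    simp [pvItem]

-- both folds append the same per-leaf list
theorem pv_fold_eq (label sym : String) :
    ∀ (leaves : List (String × String)) (rs : List (String × String)),
      leaves.foldl (fun rs lt =>
        let l := lt.1
        let t := lt.2
        if l ≠ "-NONE-" ∧ PySem.Str.isIn sym t = true then
          let sub_toks0 := (PySem.Str.split? t sym).getD []
          let sub_toks := PySem.List.slice
            ((sub_toks0.zip (List.replicate sub_toks0.length sym)).flatMap (fun p => [p.1, p.2]))
            none (some (-1))
          let sub_labels := PySem.List.slice
            (((List.replicate sub_toks.length l).zip (List.replicate sub_toks.length label)).flatMap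
              (fun p => [p.1, p.2]))
            none (some (-1))
          rs ++ sub_labels.zip sub_toks
        else rs ++ [(l, t)]) rs
      = leaves.foldl (fun rs lt =>
        let l := lt.1
        let t := lt.2
        if l ≠ "-NONE-" ∧ PySem.Str.isIn sym t = true then
          (PySem.List.enumerate ((PySem.Str.split? t sym).getD []) 0).foldl
            (fun rs ip => (if ip.1 > 0 then rs ++ [(label, sym)] else rs) ++ [(l, ip.2)]) rs
        else rs ++ [(l, t)]) rs := by
  intro leaves
  induction leaves with
  | nil => intro rs; rfl
  | cons lt rest ih =>
    intro rs
    simp only [List.foldl_cons]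
    rw [ih]
    congr 1
    by_cases h : lt.1 ≠ "-NONE-" ∧ PySem.Str.isIn sym lt.2 = true
    · simp only [if_pos h]
      rw [pvB_item lt.1 label sym ((PySem.Str.split? lt.2 sym).getD []) rs]
      rw [pvA_item lt.1 label sym ((PySem.Str.split? lt.2 sym).getD [])]
    · simp only [if_neg h]

-- ===== VERDICT (by name: the statement is the Claim_ definition above) =====
theorem cut_leaves_spec : Claim_equal_cut_leaves := by
  intro leaves label sym _ _
  unfold Spec_cut_leaves cut_leaves cut_leaves_alt
  exact pv_fold_eq label sym leaves []
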